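-- pv_equiv track=rewrite | github.com/anmol6536/project_ideas | all_ideas/docking_pipeline/util.py | all_peptides_combinations
-- ===== SOURCE A (Python) =====
-- def all_peptides_combinations(n=1):
--     aminoacids = ['A', 'C', 'D', 'E', 'F', 'G', 'H', 'I', 'K', 'L', 'M',
--                   'N', 'P', 'Q', 'R', 'S', 'T', 'V', 'W', 'Y']
--     current_aa_length = 0
--     list_of_peptides = []
--     while current_aa_length < n:
--         if list_of_peptides:
--             new_list_of_peptides = []
--             for peptide in list_of_peptides:
--                 for aa in aminoacids:
--                     new_peptide = peptide + aa
--                     new_list_of_peptides.append(new_peptide)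
--             list_of_peptides = new_list_of_peptides
--             current_aa_length += 1
--         else:
--             list_of_peptides = aminoacids
--             current_aa_length += 1
--     return list_of_peptides
-- ===== SOURCE B (Python) =====
-- def all_peptides_combinations(n=1):
--     aminoacids = ['A', 'C', 'D', 'E', 'F', 'G', 'H', 'I', 'K', 'L', 'M',
--                   'N', 'P', 'Q', 'R', 'S', 'T', 'V', 'W', 'Y']
--     if n < 1:
--         return []
--     result = []
--     for i in range(20 ** n):
--         x = i
--         chars = []
--         for _ in range(n):
--             chars.append(aminoacids[x % 20])
--             x //= 20
--         result.append(''.join(reversed(chars)))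
--     return result
-- ===== Notes on version B (the rewrite author's own statement) =====
-- stated objective: alternative
-- what changed: B replaces A's iterative prefix-list expansion (repeatedly rebuilding the whole list by appending one residue to every peptide) with direct enumeration: each index i in range(20**n) is converted to its n-digit base-20 representation, whose digits index the amino-acid list.
import Mathlib
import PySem

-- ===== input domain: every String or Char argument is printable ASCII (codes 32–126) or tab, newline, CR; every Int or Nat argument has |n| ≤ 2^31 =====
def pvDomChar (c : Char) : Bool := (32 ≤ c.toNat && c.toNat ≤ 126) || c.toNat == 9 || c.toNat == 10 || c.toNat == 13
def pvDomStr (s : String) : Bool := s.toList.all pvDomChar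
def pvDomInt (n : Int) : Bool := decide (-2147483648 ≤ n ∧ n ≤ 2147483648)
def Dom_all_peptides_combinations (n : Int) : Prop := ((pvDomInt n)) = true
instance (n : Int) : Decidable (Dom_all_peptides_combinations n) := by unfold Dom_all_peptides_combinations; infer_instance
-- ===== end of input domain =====

-- B enumerates each peptide independently by base-20 conversion of its index instead of
-- iteratively expanding a prefix list (objective: alternative decomposition, same output).

-- ===== PORT A =====
-- the aminoacids list A builds at the top
def pvAminoA : List String :=
  ["A", "C", "D", "E", "F", "G", "H", "I", "K", "L", "M",
   "N", "P", "Q", "R", "S", "T", "V", "W", "Y"]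

-- the nested for-loops: for peptide in lst: for aa in aminoacids: new_list.append(peptide + aa)
def pvAexpand (lst : List String) : List String :=
  lst.foldl (fun acc peptide =>
    pvAminoA.foldl (fun acc2 aa => acc2 ++ [peptide ++ aa]) acc) []

-- the while loop: while current_aa_length < n, with the if list_of_peptides branch
def pvAloop (n current : Int) (lst : List String) : List String :=
  if current < n then
    if lst ≠ [] then pvAloop n (current + 1) (pvAexpand lst)
    else pvAloop n (current + 1) pvAminoA
  else lst
termination_by (n - current).toNat
decreasing_by all_goals omega

def all_peptides_combinations (n : Int) : List String := pvAloop n 0 []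

-- ===== PORT B =====
def pvAminoB : List String :=
  ["A", "C", "D", "E", "F", "G", "H", "I", "K", "L", "M",
   "N", "P", "Q", "R", "S", "T", "V", "W", "Y"]

-- inner loop: for _ in range(n): chars.append(aminoacids[x % 20]); x //= 20
-- (x % 20 is always in [0, 20), so the pyGet? lookup never misses; .getD "" is never taken)
def pvBchars : Nat → Int → List String → List String
  | 0, _, chars => chars
  | steps + 1, x, chars =>
      pvBchars steps (PySem.Int.floordiv x 20)
        (chars ++ [(PySem.List.pyGet? pvAminoB (PySem.Int.mod x 20)).getD ""])

-- ''.join(reversed(chars))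
def pvBpep (steps : Nat) (i : Int) : String :=
  PySem.Str.join "" (pvBchars steps i []).reverse

def all_peptides_combinations_alt (n : Int) : List String :=
  if n < 1 then []
  else (PySem.List.pyRange 0 ((20 : Int) ^ n.toNat) 1).foldl
         (fun result i => result ++ [pvBpep n.toNat i]) []

-- ===== PRECONDITION & SPEC =====
def Spec_all_peptides_combinations (n : Int) (out : List String) : Prop := out = all_peptides_combinations_alt n
instance (n : Int) (out : List String) : Decidable (Spec_all_peptides_combinations n out) := by unfold Spec_all_peptides_combinations; infer_instance

-- ===== CLAIM (what is proved, stated in full; the proofs are below) =====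
def Claim_equal_all_peptides_combinations : Prop := ∀ (n : Int), Dom_all_peptides_combinations n → Spec_all_peptides_combinations n (all_peptides_combinations n)

-- ===== LEMMAS AND PROOFS =====

-- A's expansion step in closed form
theorem pvAexpand_eq (lst : List String) :
    pvAexpand lst = lst.flatMap (fun p => pvAminoA.map (fun aa => p ++ aa)) := by
  unfold pvAexpand
  simp only [PySem.List.foldl_append_singleton_eq_map, PySem.List.foldl_append_eq_flatMap,
    List.nil_append]

theorem pvAexpand_ne_nil {lst : List String} (h : lst ≠ []) : pvAexpand lst ≠ [] := by
  rw [pvAexpand_eq]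
  cases lst with
  | nil => exact absurd rfl h
  | cons p rest => simp [pvAminoA]

-- the while loop iterates pvAexpand
theorem pvAloop_eq (k : Nat) : ∀ (n c : Int) (lst : List String), lst ≠ [] →
    n - c = (k : Int) → pvAloop n c lst = pvAexpand^[k] lst := by
  induction k with
  | zero =>
    intro n c lst _ hk
    rw [pvAloop]
    simp only [if_neg (by omega : ¬ c < n)]
    rfl
  | succ k ih =>
    intro n c lst hne hk
    rw [pvAloop]
    simp only [if_pos (by omega : c < n), if_pos hne]
    rw [ih n (c + 1) (pvAexpand lst) (pvAexpand_ne_nil hne) (by omega)]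
    rw [Function.iterate_succ_apply]

-- acc generalization for B's digit collector
theorem pvBchars_acc (s : Nat) : ∀ (x : Int) (acc : List String),
    pvBchars s x acc = acc ++ pvBchars s x [] := by
  induction s with
  | zero => intro x acc; simp [pvBchars]
  | succ s ih =>
    intro x acc
    rw [pvBchars, pvBchars, ih _ (acc ++ _), ih _ ([] ++ _)]
    simp

-- ''.join with empty separator distributes over appending a last piece
theorem pvCharsJoinE (l : List (List Char)) (y : List Char) :
    PySem.Chars.join [] (l ++ [y]) = PySem.Chars.join [] l ++ y := by
  induction l with
  | nil => simp [PySem.Chars.join_singleton, PySem.Chars.join_nil]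
  | cons a l ih =>
    cases l with
    | nil => simp [PySem.Chars.join_singleton, PySem.Chars.join_cons_cons]
    | cons b r =>
      simp only [List.cons_append] at ih ⊢
      rw [PySem.Chars.join_cons_cons, PySem.Chars.join_cons_cons, ih]
      simp [List.append_assoc]

theorem pvJoinE (l : List String) (y : String) :
    PySem.Str.join "" (l ++ [y]) = PySem.Str.join "" l ++ y := by
  apply String.toList_inj.mp
  simp [PySem.Str.toList_join, pvCharsJoinE]

theorem pvBpep_succ (k : Nat) (x : Int) :
    pvBpep (k + 1) x =
      pvBpep k (PySem.Int.floordiv x 20) ++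
        (PySem.List.pyGet? pvAminoB (PySem.Int.mod x 20)).getD "" := by
  unfold pvBpep
  rw [pvBchars, pvBchars_acc]
  simp only [List.nil_append, List.reverse_append, List.reverse_cons, List.reverse_nil,
    List.nil_append]
  rw [pvJoinE]

-- splitting range (N*20) into 20-blocks
theorem pvRangeMul (g : Nat → String) (m N : Nat) :
    (List.range (N * m)).map g =
      (List.range N).flatMap (fun q => (List.range m).map (fun r => g (q * m + r))) := by
  induction N with
  | zero => simp
  | succ N ih =>
    rw [Nat.succ_mul, List.range_add, List.map_append, ih, List.range_succ, List.flatMap_append]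
    simp [List.map_map, Function.comp]

-- B's digit table IS the aminoacid list
theorem pvDigit_map :
    (List.range 20).map (fun r => (PySem.List.pyGet? pvAminoB ((r : Nat) : Int)).getD "") =
      pvAminoA := by decide

-- the main combinatorial bridge
theorem pvB_map_eq (k : Nat) :
    (List.range (20 ^ (k + 1))).map (fun j : Nat => pvBpep (k + 1) (j : Int)) =
      pvAexpand^[k] pvAminoA := by
  induction k with
  | zero =>
    rw [Function.iterate_zero_apply]
    decide
  | succ k ih =>
    rw [pow_succ, pvRangeMul]
    have hstep : ∀ q : Nat,
        (List.range 20).map (fun r => pvBpep (k + 1 + 1) ((q * 20 + r : Nat) : Int)) =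
          pvAminoA.map (fun aa => pvBpep (k + 1) (q : Int) ++ aa) := by
      intro q
      rw [← pvDigit_map, List.map_map]
      apply List.map_congr_left
      intro r hr
      have hr20 : r < 20 := List.mem_range.mp hr
      rw [pvBpep_succ]
      have hfd : PySem.Int.floordiv ((q * 20 + r : Nat) : Int) 20 = (q : Int) := by
        simp [PySem.Int.floordiv, Int.fdiv_eq_ediv]; omega
      have hmd : PySem.Int.mod ((q * 20 + r : Nat) : Int) 20 = (r : Int) := by
        simp [PySem.Int.mod, Int.fmod_eq_emod]; omega
      rw [hfd, hmd]
      rfl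
    simp only [hstep]
    rw [Function.iterate_succ_apply', ← ih, pvAexpand_eq, List.flatMap_map]

-- ===== VERDICT (by name: the statement is the Claim_ definition above) =====
theorem all_peptides_combinations_spec : Claim_equal_all_peptides_combinations := by
  intro n _
  unfold Spec_all_peptides_combinations
  unfold all_peptides_combinations all_peptides_combinations_alt
  by_cases h : n < 1
  · rw [if_pos h, pvAloop]
    simp only [if_neg (by omega : ¬ (0:Int) < n)]
  · rw [if_neg h, pvAloop]
    simp only [if_pos (by omega : (0:Int) < n), if_neg (by simp : ¬ ([] : List String) ≠ []),
      zero_add]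
    rw [pvAloop_eq (n.toNat - 1) n 1 pvAminoA (by simp [pvAminoA]) (by omega)]
    rw [PySem.List.foldl_append_singleton_eq_map, List.nil_append]
    rw [show ((20:Int) ^ n.toNat) = ((20 ^ n.toNat : Nat) : Int) by push_cast; ring]
    rw [PySem.List.pyRange_zero_natCast, List.map_map]
    obtain ⟨k, hk⟩ : ∃ k, n.toNat = k + 1 := ⟨n.toNat - 1, by omega⟩
    rw [hk, Nat.add_sub_cancel]
    exact (pvB_map_eq k).symm
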